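-- pv_equiv track=rewrite | github.com/Toshi-Tabata/KuroBot | cogs/Owo.py | insert_between
-- ===== SOURCE A (Python) =====
-- def insert_between(text):
--     # Omit the 'w' since it looks better not inserting an additional 'w'
--     consonants = ['b', 'c', 'd', 'f', 'g', 'h', 'j', 'k', 'm', 'n', 'p', 'q', 's', 't', 'v', 'y', 'z']
--     vowels = ['a', 'e', 'i', 'o', 'u']
--
--     inserted_text = text[0]
--
--     # Loop pairwise through each piece of text
--     for idx, letter in enumerate(text[:-1]):
--         if letter.lower() in consonants and text[idx + 1].lower() in vowels:
--             w = "w" if letter.islower() else "W"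
--             inserted_text += w
--
--         inserted_text += text[idx + 1]
--
--     return inserted_text
-- ===== SOURCE B (Python) =====
-- def insert_between(text):
--     consonants = "bcdfghjkmnpqstvyz"
--     vowels = "aeiou"
--     # Pass 1: find every consonant-vowel boundary position.
--     cuts = [i for i in range(len(text) - 1)
--             if text[i].lower() in consonants and text[i + 1].lower() in vowels]
--     # Pass 2: splice the string at those positions, inserting the case-matched w.
--     pieces = []
--     start = 0
--     for i in cuts:
--         pieces.append(text[start:i + 1])
--         pieces.append("w" if text[i].islower() else "W")
--         start = i + 1
--     pieces.append(text[start:])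
--     return "".join(pieces)
-- ===== Notes on version B (the rewrite author's own statement) =====
-- stated objective: alternative
-- what changed: Replaces A's single pairwise character loop that emits characters one by one with a two-stage algorithm: first compute the list of all consonant-vowel boundary positions, then assemble the result by splicing whole slices of the input at those positions with the case-matched 'w' between them (bulk slice copies instead of per-character work).
import Mathlib
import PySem

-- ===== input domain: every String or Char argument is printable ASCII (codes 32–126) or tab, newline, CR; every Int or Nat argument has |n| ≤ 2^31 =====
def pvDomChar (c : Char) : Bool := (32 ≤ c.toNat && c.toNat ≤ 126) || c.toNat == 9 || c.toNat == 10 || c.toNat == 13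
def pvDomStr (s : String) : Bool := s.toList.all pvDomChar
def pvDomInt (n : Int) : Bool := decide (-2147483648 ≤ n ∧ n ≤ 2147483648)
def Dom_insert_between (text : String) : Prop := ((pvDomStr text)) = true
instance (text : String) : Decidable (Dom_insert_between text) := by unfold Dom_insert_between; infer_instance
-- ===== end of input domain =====

-- B replaces A's single pairwise emit-as-you-go loop by a two-stage algorithm (find all
-- consonant-vowel boundary positions, then splice slices of the input at them); return-value
-- equivalence only; A raises IndexError on "", which Pre_ excludes (B returns "").

-- ===== PORT A =====
def pvConsonants : List Char := ['b','c','d','f','g','h','j','k','m','n','p','q','s','t','v','y','z']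
def pvVowels : List Char := ['a','e','i','o','u']

-- letter.lower() in consonants / text[idx+1].lower() in vowels, per character
def pvInCons (c : Char) : Bool := decide (PySem.Chars.lowerChar c ∈ pvConsonants)
def pvInVow (c : Char) : Bool := decide (PySem.Chars.lowerChar c ∈ pvVowels)

-- loop body of A: one step of 'for idx, letter in enumerate(text[:-1])'
def pvStepA (cs : List Char) (acc : List Char) (p : Int × Char) : List Char :=
  let idx := p.1
  let letter := p.2
  let nxt := PySem.List.pyGetD cs (idx + 1) ' '
  let acc := if pvInCons letter && pvInVow nxt then
      acc ++ [if PySem.Chars.islower letter then 'w' else 'W']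
    else acc
  acc ++ [nxt]

-- transliteration of A: inserted_text = text[0]; for idx, letter in enumerate(text[:-1]): ...
-- (text[0] on the empty string raises IndexError in Python; that input is excluded by Pre_)
def insert_between (text : String) : String :=
  let cs := text.toList
  let first := PySem.List.pyGetD cs 0 ' '
  String.ofList <|
    (PySem.List.enumerate (PySem.List.slice cs none (some (-1))) 0).foldl (pvStepA cs) [first]

-- ===== PORT B =====
-- Source B pass 1: cuts = [i for i in range(len(text)-1) if text[i].lower() in consonants and text[i+1].lower() in vowels]
def pvCutsP (cs : List Char) (i : Nat) : Bool :=
  pvInCons (cs.getD i ' ') && pvInVow (cs.getD (i + 1) ' ')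

def pvCuts (cs : List Char) : List Nat :=
  (List.range (cs.length - 1)).filter (pvCutsP cs)

-- Source B pass 2 loop body: pieces += [text[start:i+1], w]; start = i+1
-- (acc.1 = the pieces, already concatenated as ''.join will; acc.2 = start)
def pvPiece (cs : List Char) (acc : List Char × Nat) (i : Nat) : List Char × Nat :=
  (acc.1 ++ cs.extract acc.2 (i + 1)
        ++ [if PySem.Chars.islower (cs.getD i ' ') then 'w' else 'W'], i + 1)

def insert_between_alt (text : String) : String :=
  let cs := text.toList
  let r := (pvCuts cs).foldl (pvPiece cs) ([], 0)
  String.ofList (r.1 ++ cs.drop r.2)   -- pieces.append(text[start:]); ''.join(pieces)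

-- ===== PRECONDITION & SPEC =====
-- Pre_ excludes only the empty string, on which A raises IndexError at text[0].
def Pre_insert_between (text : String) : Prop := text.toList ≠ []
instance (text : String) : Decidable (Pre_insert_between text) := by unfold Pre_insert_between; infer_instance
def pvWitness_insert_between : String := "bye owo"

def Spec_insert_between (text : String) (out : String) : Prop := out = insert_between_alt text
instance (text : String) (out : String) : Decidable (Spec_insert_between text out) := by unfold Spec_insert_between; infer_instance

-- ===== CLAIM (what is proved, stated in full; the proofs are below) =====
def Claim_equal_insert_between : Prop := ∀ (text : String), Dom_insert_between text → Pre_insert_between text → Spec_insert_between text (insert_between text)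

-- ===== LEMMAS AND PROOFS =====

-- canonical pairwise form: what both programs produce after a first character `prev`
def pvScanA (prev : Char) : List Char → List Char
  | [] => []
  | c :: rest =>
    (if pvInCons prev && pvInVow c then [if PySem.Chars.islower prev then 'w' else 'W'] else [])
      ++ c :: pvScanA c rest

-- A's fold over enumerate(cs[:-1]) starting at index k, written against pvScanA
theorem pvStepA_eq (cs a : List Char) (p : Int × Char) :
    pvStepA cs a p =
      (if pvInCons p.2 && pvInVow (PySem.List.pyGetD cs (p.1 + 1) ' ') then
          a ++ [if PySem.Chars.islower p.2 then 'w' else 'W'] else a)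
        ++ [PySem.List.pyGetD cs (p.1 + 1) ' '] := rfl

theorem foldA_eq (cs : List Char) : ∀ (m k : Nat) (acc : List Char), cs.length - k ≤ m → k < cs.length →
    (PySem.List.enumerate (cs.dropLast.drop k) k).foldl (pvStepA cs) acc
      = acc ++ pvScanA (cs.getD k ' ') (cs.drop (k + 1)) := by
  intro m
  induction m with
  | zero => intro k acc h1 h2; omega
  | succ m ih =>
    intro k acc h1 h2
    by_cases hk : k + 1 < cs.length
    · -- the segment is nonempty: its head is cs[k]
      have hdl : cs.dropLast.drop k = cs[k] :: cs.dropLast.drop (k + 1) := by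
        have : k < cs.dropLast.length := by
          simp [List.length_dropLast]; omega
        rw [List.drop_eq_getElem_cons this, List.getElem_dropLast]
      have hcast : (k : Int) + 1 = ((k + 1 : Nat) : Int) := by push_cast; ring
      have hget1 : PySem.List.pyGetD cs ((k : Int) + 1) ' ' = cs[k + 1] := by
        rw [hcast, PySem.List.pyGetD_natCast, List.getD_eq_getElem cs ' ' hk]
      have hdrop : cs.drop (k + 1) = cs[k + 1] :: cs.drop (k + 2) := by
        rw [List.drop_eq_getElem_cons hk]
      rw [hdl, PySem.List.enumerate_cons, List.foldl_cons, pvStepA_eq, hget1, hcast,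
          ih (k + 1) _ (by omega) hk]
      rw [List.getD_eq_getElem cs ' ' (by omega : k < cs.length),
          List.getD_eq_getElem cs ' ' hk, hdrop]
      simp [pvScanA]
      split <;> simp
    · -- last index: the segment is empty
      have h3 : cs.dropLast.drop k = [] := by
        apply List.drop_eq_nil_of_le
        simp [List.length_dropLast]; omega
      have h4 : cs.drop (k + 1) = [] := List.drop_eq_nil_of_le (by omega)
      rw [h3, h4]
      simp [PySem.List.enumerate, pvScanA]

-- B's fold plus the trailing drop, as one function of the remaining cut list and start
def pvAsm (cs : List Char) (a : List Char) (s : Nat) (ks : List Nat) : List Char :=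
  let r := ks.foldl (pvPiece cs) (a, s)
  r.1 ++ cs.drop r.2

theorem extract_cons (cs : List Char) (s e : Nat) (hs : s < cs.length) (he : s < e) :
    cs.extract s e = cs.getD s ' ' :: cs.extract (s + 1) e := by
  rw [List.extract_eq_take_drop, List.extract_eq_take_drop,
      List.drop_eq_getElem_cons hs, List.getD_eq_getElem cs ' ' hs]
  have : e - s = (e - (s + 1)) + 1 := by omega
  rw [this, List.take_succ_cons]

-- stepping the start past a non-cut position s emits cs[s] unchanged
theorem pvAsm_shift (cs : List Char) (s : Nat) (hs : s < cs.length) :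
    ∀ (ks : List Nat) (a : List Char), (∀ k ∈ ks, s + 1 ≤ k) →
    pvAsm cs a s ks = pvAsm cs (a ++ [cs.getD s ' ']) (s + 1) ks := by
  intro ks
  induction ks with
  | nil =>
    intro a _
    show a ++ cs.drop s = (a ++ [cs.getD s ' ']) ++ cs.drop (s + 1)
    rw [List.drop_eq_getElem_cons hs, List.getD_eq_getElem cs ' ' hs]
    simp
  | cons k rest ih =>
    intro a hmem
    have hk : s + 1 ≤ k := hmem k (by simp)
    simp only [pvAsm, List.foldl_cons] at *
    have : pvPiece cs (a, s) k = pvPiece cs (a ++ [cs.getD s ' '], s + 1) k := by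
      simp only [pvPiece]
      rw [extract_cons cs s (k + 1) hs (by omega)]
      simp
    rw [this]

-- main invariant: splicing at the cuts in [s, n-1) reproduces the canonical pairwise scan
theorem pvAsm_eq (cs : List Char) : ∀ (m s : Nat) (a : List Char),
    cs.length - s ≤ m + 1 → s < cs.length →
    pvAsm cs a s ((List.range' s (cs.length - 1 - s)).filter (pvCutsP cs))
      = a ++ cs.getD s ' ' :: pvScanA (cs.getD s ' ') (cs.drop (s + 1)) := by
  intro m
  induction m with
  | zero =>
    intro s a h1 h2
    have hz : cs.length - 1 - s = 0 := by omega
    have hd : cs.drop (s + 1) = [] := List.drop_eq_nil_of_le (by omega)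
    rw [hz]
    show a ++ cs.drop s = a ++ cs.getD s ' ' :: pvScanA (cs.getD s ' ') (cs.drop (s + 1))
    rw [List.drop_eq_getElem_cons h2, hd, List.getD_eq_getElem cs ' ' h2]
    rfl
  | succ m ih =>
    intro s a h1 h2
    by_cases hk : s + 1 < cs.length
    · have hr : cs.length - 1 - s = (cs.length - 1 - (s + 1)) + 1 := by omega
      rw [hr, List.range'_succ]
      have hdrop : cs.drop (s + 1) = cs.getD (s + 1) ' ' :: cs.drop (s + 2) := by
        rw [List.drop_eq_getElem_cons hk, List.getD_eq_getElem cs ' ' hk]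
      by_cases hp : pvCutsP cs s
      · -- s is a cut: emit text[start:s+1] and the w, continue from s+1
        rw [List.filter_cons_of_pos hp]
        have hstep : pvPiece cs (a, s) s =
            (a ++ [cs.getD s ' ', if PySem.Chars.islower (cs.getD s ' ') then 'w' else 'W'], s + 1) := by
          simp only [pvPiece]
          rw [extract_cons cs s (s + 1) h2 (by omega)]
          simp [List.extract_eq_take_drop]
        simp only [pvAsm, List.foldl_cons, hstep]
        have := ih (s + 1) (a ++ [cs.getD s ' ', if PySem.Chars.islower (cs.getD s ' ') then 'w' else 'W']) (by omega) hk
        simp only [pvAsm] at this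
        rw [this, hdrop]
        unfold pvCutsP at hp
        simp only [pvScanA, hp]
        simp
      · -- s is not a cut: cs[s] passes through inside the next slice
        rw [List.filter_cons_of_neg hp]
        rw [pvAsm_shift cs s h2 _ a (by
          intro k hkmem
          have := List.mem_range'.mp (List.mem_filter.mp hkmem).1
          omega)]
        have := ih (s + 1) (a ++ [cs.getD s ' ']) (by omega) hk
        rw [this, hdrop]
        rw [Bool.not_eq_true] at hp
        unfold pvCutsP at hp
        simp only [pvScanA, hp]
        simp
    · have hz : cs.length - 1 - s = 0 := by omega
      have hd : cs.drop (s + 1) = [] := List.drop_eq_nil_of_le (by omega)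
      rw [hz]
      show a ++ cs.drop s = a ++ cs.getD s ' ' :: pvScanA (cs.getD s ' ') (cs.drop (s + 1))
      rw [List.drop_eq_getElem_cons h2, hd, List.getD_eq_getElem cs ' ' h2]
      rfl

-- ===== VERDICT (by name: the statement is the Claim_ definition above) =====
theorem insert_between_spec : Claim_equal_insert_between := by
  unfold Claim_equal_insert_between
  intro text _ hpre
  unfold Pre_insert_between at hpre
  unfold Spec_insert_between
  have hlen : 0 < text.toList.length := List.length_pos_iff.mpr hpre
  simp only [insert_between, insert_between_alt, PySem.List.slice_to_neg_one]
  have hA := foldA_eq text.toList text.toList.length 0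
    [PySem.List.pyGetD text.toList 0 ' '] (by omega) hlen
  simp only [List.drop_zero, Nat.cast_zero] at hA
  have hB := pvAsm_eq text.toList text.toList.length 0 [] (by omega) hlen
  simp only [pvAsm, Nat.sub_zero] at hB
  rw [hA]
  unfold pvCuts
  rw [List.range_eq_range', hB]
  have : PySem.List.pyGetD text.toList 0 ' ' = text.toList.getD 0 ' ' := by
    rw [show (0 : Int) = ((0 : Nat) : Int) from rfl, PySem.List.pyGetD_natCast]
  simp [this]
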